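-- pv_equiv track=rewrite | github.com/subodhkc/skc_log_analyzer-3.0 | 1.7skc_log_analyzer_rca/analyzer/stack_summarizer.py | summarize_stack_trace
-- ===== SOURCE A (Python) =====
-- def summarize_stack_trace(entry):
--     """
--     Extracts a high-level summary and top stack frame from a multi-line error entry.
--
--     This function is designed to help with RCA (root cause analysis) by:
--     - Identifying the first 'Exception' or 'Error' line as the summary
--     - Extracting the topmost stack frame (first line starting with 'at ')
--
--     Args:
--         entry (str): A multi-line log string (e.g., a merged stack trace)
--
--     Returns:
--         dict: Summary including:
--             - 'summary': The first matching exception/error line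
--             - 'top_frame': The first stack frame line, if present
--     """
--     lines = entry.split("\n")
--     summary = None
--
--     # Look for the first line that mentions an Exception or Error
--     for line in lines:
--         if "Exception" in line or "Error" in line:
--             summary = line.strip()
--             break
--
--     # Extract lines that look like stack frames (e.g., "at com.foo.Bar.method...")
--     top_frames = [line.strip() for line in lines if line.strip().startswith("at ")]
--
--     return {
--         "summary": summary or "Unknown Exception",              # Fallback if no match
--         "top_frame": top_frames[0] if top_frames else "No frame detected"
--     }
-- ===== SOURCE B (Python) =====
-- def summarize_stack_trace(entry):
--     # Single early-exit pass maintaining two accumulators, instead of A's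
--     # two separate scans (one loop plus a full list comprehension).
--     summary = None
--     top_frame = None
--     for line in entry.split("\n"):
--         if summary is None and ("Exception" in line or "Error" in line):
--             summary = line.strip()
--         if top_frame is None:
--             stripped = line.strip()
--             if stripped.startswith("at "):
--                 top_frame = stripped
--         if summary is not None and top_frame is not None:
--             break
--     return {
--         "summary": summary or "Unknown Exception",
--         "top_frame": top_frame if top_frame is not None else "No frame detected",
--     }
-- ===== Notes on version B (the rewrite author's own statement) =====
-- stated objective: simpler
-- what changed: Replaces A's two separate scans (an early-breaking loop for the summary plus a full list comprehension collecting all stack-frame lines) with one combined single pass carrying two accumulators that exits early once both are found.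
import Mathlib
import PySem

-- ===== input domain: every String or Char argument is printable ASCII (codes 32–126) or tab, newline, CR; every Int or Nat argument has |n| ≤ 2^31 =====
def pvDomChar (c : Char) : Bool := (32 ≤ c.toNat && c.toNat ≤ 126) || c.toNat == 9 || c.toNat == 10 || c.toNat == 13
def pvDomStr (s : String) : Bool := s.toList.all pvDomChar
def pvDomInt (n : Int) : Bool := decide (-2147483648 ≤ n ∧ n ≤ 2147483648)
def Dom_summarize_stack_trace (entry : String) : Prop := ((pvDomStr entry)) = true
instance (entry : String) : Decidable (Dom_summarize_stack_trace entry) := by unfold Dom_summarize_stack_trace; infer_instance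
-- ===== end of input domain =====

-- B replaces A's two separate scans (early-breaking summary loop + full frame comprehension)
-- with one combined single pass over the lines carrying two accumulators, exiting early.


-- ===== PORT A =====
-- first line mentioning 'Exception' or 'Error', stripped (A's early-breaking loop)
def aFirstErr : List String → Option String
  | [] => none
  | l :: ls =>
      if PySem.Str.isIn "Exception" l || PySem.Str.isIn "Error" l then
        some (PySem.Str.strip l)
      else aFirstErr ls

def summarize_stack_trace (entry : String) : List (String × String) :=
  let lines := ((PySem.Str.split? entry "\n").getD [])
  let summary : Option String := aFirstErr lines
  -- [line.strip() for line in lines if line.strip().startswith("at ")]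
  let top_frames : List String :=
    (lines.filter (fun l => PySem.Str.startswith (PySem.Str.strip l) "at ")).map PySem.Str.strip
  [("summary",
      match summary with
      | some s => if s = "" then "Unknown Exception" else s   -- Python 'or' truthiness
      | none => "Unknown Exception"),
   ("top_frame",
      match top_frames with
      | f :: _ => f
      | [] => "No frame detected")]

-- ===== PORT B =====
-- one pass, two accumulators, early exit once both are set
def bScan : List String → Option String → Option String → Option String × Option String
  | [], su, tf => (su, tf)
  | l :: ls, su, tf =>
      let su' := if su.isNone && (PySem.Str.isIn "Exception" l || PySem.Str.isIn "Error" l)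
                 then some (PySem.Str.strip l) else su
      let tf' := if tf.isNone && PySem.Str.startswith (PySem.Str.strip l) "at "
                 then some (PySem.Str.strip l) else tf
      if su'.isSome && tf'.isSome then (su', tf') else bScan ls su' tf'

def summarize_stack_trace_alt (entry : String) : List (String × String) :=
  let (summary, top_frame) := bScan (((PySem.Str.split? entry "\n").getD [])) none none
  [("summary",
      match summary with
      | some s => if s = "" then "Unknown Exception" else s
      | none => "Unknown Exception"),
   ("top_frame",
      match top_frame with
      | some f => f
      | none => "No frame detected")]

-- ===== PRECONDITION & SPEC =====
def Spec_summarize_stack_trace (entry : String) (out : List (String × String)) : Prop := out = summarize_stack_trace_alt entry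
instance (entry : String) (out : List (String × String)) : Decidable (Spec_summarize_stack_trace entry out) := by unfold Spec_summarize_stack_trace; infer_instance

-- ===== CLAIM (what is proved, stated in full; the proofs are below) =====
def Claim_equal_summarize_stack_trace : Prop := ∀ (entry : String), Dom_summarize_stack_trace entry → Spec_summarize_stack_trace entry (summarize_stack_trace entry)

-- ===== LEMMAS AND PROOFS =====

-- B's single pass computes exactly A's two scans (with accumulators as partial results)
theorem bScan_eq (ls : List String) : ∀ (su tf : Option String),
    bScan ls su tf =
      (su.orElse (fun _ => aFirstErr ls),
       tf.orElse (fun _ =>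
         ((ls.filter (fun l => PySem.Str.startswith (PySem.Str.strip l) "at ")).map
            PySem.Str.strip).head?)) := by
  induction ls with
  | nil => intro su tf; cases su <;> cases tf <;> simp only [bScan, Option.orElse_none,
      List.filter_nil, List.map_nil, List.head?_nil, aFirstErr, Option.orElse_some,
      Option.orElse_none]
  | cons l ls ih =>
      intro su tf
      cases su <;> cases tf <;>
        simp only [bScan, Option.isNone_none, Option.isNone_some, Bool.true_and,
          Bool.false_and, if_true, if_false, Option.isSome_some, Bool.and_true,
          Bool.true_and, aFirstErr, List.filter_cons, Option.orElse_some,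
          Option.orElse_none, ih] <;>
        split_ifs with h1 h2 <;>
        simp_all [Option.orElse_some, Option.orElse_none, List.head?]

-- ===== VERDICT (by name: the statement is the Claim_ definition above) =====
theorem summarize_stack_trace_spec : Claim_equal_summarize_stack_trace := by
  intro entry _
  unfold Spec_summarize_stack_trace summarize_stack_trace summarize_stack_trace_alt
  rw [bScan_eq]
  simp only [Option.orElse_none]
  cases h : aFirstErr ((PySem.Str.split? entry "\n").getD []) <;>
  cases h2 : ((PySem.Str.split? entry "\n").getD []).filter
      (fun l => PySem.Str.startswith (PySem.Str.strip l) "at ") <;>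
  simp only [h, List.map_nil, List.map_cons, List.head?_nil, List.head?_cons]
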